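-- pv_equiv track=rewrite | github.com/CRISPRestaurant/gBlock-Generator | cooked_up_libraries/dna_properties.py | noHomopolymerMoreThanFourTs
-- ===== SOURCE A (Python) =====
-- def noHomopolymerMoreThanFourTs(sequence):
--     loader = ""
--
--     for i in sequence:
--         if i == "T":
--             loader += "T"
--
--             if len(loader) > 4:
--                 return False
--         else:
--             loader = ""
--
--     return True
-- ===== SOURCE B (Python) =====
-- def noHomopolymerMoreThanFourTs(sequence):
--     return "TTTTT" not in sequence
-- ===== Notes on version B (the rewrite author's own statement) =====
-- stated objective: idiomatic
-- what changed: Replaces the character-by-character run-counter loop (with early return) by a single substring-membership test for the length-5 T-run, since a T-run longer than four is exactly an occurrence of that substring.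
import Mathlib
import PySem

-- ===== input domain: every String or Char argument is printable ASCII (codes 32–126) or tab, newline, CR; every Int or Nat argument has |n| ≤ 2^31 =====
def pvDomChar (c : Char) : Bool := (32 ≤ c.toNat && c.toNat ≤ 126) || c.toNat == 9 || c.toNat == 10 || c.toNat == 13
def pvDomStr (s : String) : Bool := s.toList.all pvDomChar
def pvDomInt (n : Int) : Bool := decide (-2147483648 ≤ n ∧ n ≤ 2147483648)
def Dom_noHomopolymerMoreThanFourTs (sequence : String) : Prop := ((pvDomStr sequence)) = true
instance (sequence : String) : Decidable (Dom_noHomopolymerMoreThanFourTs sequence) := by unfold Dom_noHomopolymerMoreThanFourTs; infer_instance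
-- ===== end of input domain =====

-- B replaces A's run-counter scan by one substring test `"TTTTT" not in sequence` (idiomatic; same O(n) cost).

-- ===== PORT A =====
-- 'loader' accumulates the current run of 'T's; the loop returns False as soon as it exceeds 4.
def noHomopolymerGo (loader : List Char) : List Char → Bool
  | [] => true
  | i :: rest =>
    if i = 'T' then
      let loader' := loader ++ ['T']
      if loader'.length > 4 then false else noHomopolymerGo loader' rest
    else
      noHomopolymerGo [] rest

def noHomopolymerMoreThanFourTs (sequence : String) : Bool :=
  noHomopolymerGo [] sequence.toList

-- ===== PORT B =====
def noHomopolymerMoreThanFourTs_alt (sequence : String) : Bool :=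
  ! PySem.Str.isIn "TTTTT" sequence

-- ===== PRECONDITION & SPEC =====
def Spec_noHomopolymerMoreThanFourTs (sequence : String) (out : Bool) : Prop := out = noHomopolymerMoreThanFourTs_alt sequence
instance (sequence : String) (out : Bool) : Decidable (Spec_noHomopolymerMoreThanFourTs sequence out) := by unfold Spec_noHomopolymerMoreThanFourTs; infer_instance

-- ===== CLAIM (what is proved, stated in full; the proofs are below) =====
def Claim_equal_noHomopolymerMoreThanFourTs : Prop := ∀ (sequence : String), Dom_noHomopolymerMoreThanFourTs sequence → Spec_noHomopolymerMoreThanFourTs sequence (noHomopolymerMoreThanFourTs sequence)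

-- ===== LEMMAS AND PROOFS =====

-- A replicate of 'T' longer than the 'T'-free-terminated block is never a prefix of it.
lemma not_replicate_prefix (c : Char) (hc : c ≠ 'T') (rest : List Char) :
    ∀ (k m : Nat), k < m → ¬ (List.replicate m 'T' <+: List.replicate k 'T' ++ c :: rest) := by
  intro k
  induction k with
  | zero =>
      intro m hm h
      cases m with
      | zero => omega
      | succ m =>
          simp [List.replicate_succ, List.cons_prefix_cons] at h
          exact hc h.1.symm
  | succ k ih =>
      intro m hm h
      cases m with
      | zero => omega
      | succ m =>
          rw [List.replicate_succ, List.replicate_succ, List.cons_append,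
              List.cons_prefix_cons] at h
          exact ih m (by omega) h.2

-- Crossing a non-'T' character: any occurrence of 'TTTTT' lies entirely in the tail.
lemma infix_across (c : Char) (hc : c ≠ 'T') (rest : List Char) :
    ∀ (k : Nat), k ≤ 4 →
      (List.replicate 5 'T' <:+: List.replicate k 'T' ++ c :: rest ↔
       List.replicate 5 'T' <:+: rest) := by
  intro k
  induction k with
  | zero =>
      intro _
      rw [List.replicate_zero, List.nil_append, List.infix_cons_iff]
      constructor
      · rintro (h | h)
        · exact absurd h (by
            have := not_replicate_prefix c hc rest 0 5 (by omega)
            rwa [List.replicate_zero, List.nil_append] at this)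
        · exact h
      · exact Or.inr
  | succ k ih =>
      intro hk
      have e : List.replicate (k + 1) 'T' ++ c :: rest
          = 'T' :: (List.replicate k 'T' ++ c :: rest) := by
        rw [List.replicate_succ, List.cons_append]
      rw [e, List.infix_cons_iff]
      constructor
      · rintro (h | h)
        · exact absurd h (by
            have := not_replicate_prefix c hc rest (k + 1) 5 (by omega)
            rwa [e] at this)
        · exact (ih (by omega)).mp h
      · intro h
        exact Or.inr ((ih (by omega)).mpr h)

-- Main invariant: with a current run of k ≤ 4 'T's, A's loop answers
-- "no 'TTTTT' occurs in (run ++ remaining input)".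
lemma go_eq (cs : List Char) :
    ∀ k, k ≤ 4 →
      noHomopolymerGo (List.replicate k 'T') cs
        = ! decide (List.replicate 5 'T' <:+: List.replicate k 'T' ++ cs) := by
  induction cs with
  | nil =>
      intro k hk
      have h : ¬ (List.replicate 5 'T' <:+: List.replicate k 'T' ++ ([] : List Char)) := by
        intro h
        have := h.sublist.length_le
        simp only [List.length_replicate, List.append_nil] at this
        omega
      simp only [noHomopolymerGo, decide_eq_false h, Bool.not_false]
  | cons c rest ih =>
      intro k hk
      by_cases hc : c = 'T'
      · subst hc
        have hsplit : List.replicate k 'T' ++ 'T' :: rest = List.replicate (k + 1) 'T' ++ rest := by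
          rw [List.replicate_succ']
          simp
        by_cases h4 : k = 4
        · subst h4
          have hinf : List.replicate 5 'T' <:+: List.replicate 4 'T' ++ 'T' :: rest := by
            rw [hsplit]
            exact ((List.replicate 5 'T').prefix_append rest).isInfix
          have hL : noHomopolymerGo (List.replicate 4 'T') ('T' :: rest) = false := rfl
          rw [hL, decide_eq_true hinf, Bool.not_true]
        · have hk3 : k + 1 ≤ 4 := by omega
          have step : noHomopolymerGo (List.replicate k 'T') ('T' :: rest)
              = noHomopolymerGo (List.replicate (k + 1) 'T') rest := by
            simp only [noHomopolymerGo, if_pos]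
            rw [← List.replicate_succ']
            have hlen : ¬ (List.replicate (k + 1) 'T').length > 4 := by
              simp only [List.length_replicate]; omega
            rw [if_neg hlen]
          rw [step, ih (k + 1) hk3, hsplit]
      · have step : noHomopolymerGo (List.replicate k 'T') (c :: rest)
            = noHomopolymerGo [] rest := by
          simp [noHomopolymerGo, hc]
        have h0 := ih 0 (by omega)
        simp only [List.replicate_zero, List.nil_append] at h0
        rw [step, h0]
        congr 1
        simp only [decide_eq_decide]
        exact (infix_across c hc rest k hk).symm

-- ===== VERDICT (by name: the statement is the Claim_ definition above) =====
theorem noHomopolymerMoreThanFourTs_spec : Claim_equal_noHomopolymerMoreThanFourTs := by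
  intro s _
  unfold Spec_noHomopolymerMoreThanFourTs noHomopolymerMoreThanFourTs noHomopolymerMoreThanFourTs_alt
  have h := go_eq s.toList 0 (by omega)
  simp only [List.replicate_zero, List.nil_append] at h
  rw [h]
  congr 1
  have e : List.replicate 5 'T' = "TTTTT".toList := by decide
  rw [e]
  cases hin : PySem.Str.isIn "TTTTT" s with
  | true =>
      exact decide_eq_true ((PySem.Str.isIn_iff_infix "TTTTT" s).mp hin)
  | false =>
      refine decide_eq_false ?_
      intro h'
      have := (PySem.Str.isIn_iff_infix "TTTTT" s).mpr h'
      rw [hin] at this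
      exact Bool.false_ne_true this
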